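-- pv_equiv track=rewrite | github.com/parc-nsi/premiere-nsi-parc | chapitre15/TP/corrige/TP_puplets_Corrigé.py | population_minimale
-- ===== SOURCE A (Python) =====
-- def population_minimale(tab):
--     """Prend en paramètres :
--     - tab un tableau de tuples rassemblant les enregistrements dans 'communes69.csv'
--     Retourne un tuple constitué de la population minimale
--     et du tableau des villes atteignant ce minimum
--     """
--     ville1, pop_int1, pop_ext1, pop_tot1 = tab[0]
--     pop_min = int(pop_tot1)
--     tab_villes_min = [ville1]
--     for k in range(1, len(tab)):
--         ville, pop_int, pop_ext, pop_tot = tab[k]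
--         pop_tot = int(pop_tot)
--         if pop_tot < pop_min:
--             tab_villes_min = [ville]
--             pop_min = pop_tot
--         elif pop_tot == pop_min:
--             tab_villes_min.append(ville)
--     return (pop_min, tab_villes_min)
-- ===== SOURCE B (Python) =====
-- def population_minimale(tab):
--     """Prend en paramètres :
--     - tab un tableau de tuples rassemblant les enregistrements dans 'communes69.csv'
--     Retourne un tuple constitué de la population minimale
--     et du tableau des villes atteignant ce minimum
--     """
--     pop_min = min(int(t[3]) for t in tab)
--     villes = [t[0] for t in tab if int(t[3]) == pop_min]
--     return (pop_min, villes)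
-- ===== Notes on version B (the rewrite author's own statement) =====
-- stated objective: simpler
-- what changed: Replaces the single fused scan that maintains the running minimum and rebuilds/appends the city list with two plain passes: min() over the parsed populations, then a comprehension collecting the cities that reach it.
import Mathlib
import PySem

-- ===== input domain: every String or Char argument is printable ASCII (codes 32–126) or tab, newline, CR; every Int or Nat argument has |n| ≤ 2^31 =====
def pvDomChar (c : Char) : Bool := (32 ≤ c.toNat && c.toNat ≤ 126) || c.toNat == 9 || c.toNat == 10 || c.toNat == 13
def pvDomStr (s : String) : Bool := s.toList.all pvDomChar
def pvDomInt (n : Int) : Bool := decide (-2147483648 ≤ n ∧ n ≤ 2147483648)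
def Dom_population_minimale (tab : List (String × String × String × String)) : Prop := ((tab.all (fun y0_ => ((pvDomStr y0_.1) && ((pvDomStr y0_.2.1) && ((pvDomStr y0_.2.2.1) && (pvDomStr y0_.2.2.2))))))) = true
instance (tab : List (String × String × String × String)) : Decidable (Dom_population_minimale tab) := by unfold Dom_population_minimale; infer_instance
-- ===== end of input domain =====

-- B replaces A's fused min-tracking scan by two plain passes (min, then filter); same cost, simpler.


-- ===== PORT A =====
-- int(pop_tot): PySem.Int.ofStr?; Pre_ guarantees it is `some`, `.getD 0` only makes it total.
-- The loop over k in range(1, len(tab)) reading tab[k] is ported as a fold over tab.tail (same elements, same order).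
def population_minimale (tab : List (String × String × String × String)) : Int × List String :=
  match tab with
  | [] => (0, [])  -- A raises IndexError on tab[0]; excluded by Pre_
  | t0 :: rest =>
    let pop_min0 : Int := (PySem.Int.ofStr? t0.2.2.2).getD 0
    rest.foldl (fun st t =>
      let pop_tot : Int := (PySem.Int.ofStr? t.2.2.2).getD 0
      if pop_tot < st.1 then (pop_tot, [t.1])
      else if pop_tot = st.1 then (st.1, st.2 ++ [t.1])
      else st)
      (pop_min0, [t0.1])

-- ===== PORT B =====
-- pop_min = min(int(t[3]) for t in tab); villes = [t[0] for t in tab if int(t[3]) == pop_min]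
def population_minimale_alt (tab : List (String × String × String × String)) : Int × List String :=
  let pop_min : Int := (PySem.List.min? (tab.map (fun t => (PySem.Int.ofStr? t.2.2.2).getD 0)) (fun x => x)).getD 0
  (pop_min, (tab.filter (fun t => (PySem.Int.ofStr? t.2.2.2).getD 0 = pop_min)).map (fun t => t.1))

-- ===== PRECONDITION & SPEC =====
-- Pre_ excludes exactly where A raises: the empty list (IndexError on tab[0]) and rows whose
-- fourth field is not an int literal (ValueError in int(pop_tot)).
def Pre_population_minimale (tab : List (String × String × String × String)) : Prop :=
  tab ≠ [] ∧ ∀ t ∈ tab, (PySem.Int.ofStr? t.2.2.2).isSome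
instance (tab : List (String × String × String × String)) : Decidable (Pre_population_minimale tab) := by unfold Pre_population_minimale; infer_instance
def pvWitness_population_minimale : (List (String × String × String × String)) := [("a", "b", "c", "10"), ("d", "e", "f", "07")]
def Spec_population_minimale (tab : List (String × String × String × String)) (out : Int × List String) : Prop := out = population_minimale_alt tab
instance (tab : List (String × String × String × String)) (out : Int × List String) : Decidable (Spec_population_minimale tab out) := by unfold Spec_population_minimale; infer_instance

-- ===== CLAIM (what is proved, stated in full; the proofs are below) =====
def Claim_equal_population_minimale : Prop := ∀ (tab : List (String × String × String × String)), Dom_population_minimale tab → Pre_population_minimale tab → Spec_population_minimale tab (population_minimale tab)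

-- ===== LEMMAS AND PROOFS =====

-- parsed population of a row (total on Pre_ rows)
def pvPop (t : String × String × String × String) : Int := (PySem.Int.ofStr? t.2.2.2).getD 0

-- A's loop body
def pvStep (st : Int × List String) (t : String × String × String × String) : Int × List String :=
  if pvPop t < st.1 then (pvPop t, [t.1])
  else if pvPop t = st.1 then (st.1, st.2 ++ [t.1])
  else st

-- the running minimum never exceeds its start value
theorem pvMin_mono (rest : List (String × String × String × String)) (a : Int) :
    rest.foldl (fun a t => min a (pvPop t)) a ≤ a := by
  induction rest generalizing a with
  | nil => simp
  | cons u rest ih => exact le_trans (ih (min a (pvPop u))) (min_le_left _ _)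

-- Invariant of A's fused scan: from state (m, vs) the fold computes the running minimum M,
-- keeps vs iff the minimum never dropped below m, and appends exactly the rows achieving M.
set_option maxRecDepth 4000 in
theorem pvFold_inv (rest : List (String × String × String × String)) (m : Int) (vs : List String) :
    rest.foldl pvStep (m, vs)
      = (rest.foldl (fun a t => min a (pvPop t)) m,
         (if rest.foldl (fun a t => min a (pvPop t)) m = m then vs else [])
           ++ (rest.filter (fun t => pvPop t = rest.foldl (fun a t => min a (pvPop t)) m)).map (fun t => t.1)) := by
  induction rest generalizing m vs with
  | nil => simp
  | cons t rest ih =>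
    simp only [List.foldl_cons, List.filter_cons]
    by_cases h1 : pvPop t < m
    · have hstep : pvStep (m, vs) t = (pvPop t, [t.1]) := by simp [pvStep, h1]
      have hmin : min m (pvPop t) = pvPop t := min_eq_right h1.le
      rw [hstep, ih]
      simp only [hmin]
      have hM := pvMin_mono rest (pvPop t)
      have hMne : rest.foldl (fun a t => min a (pvPop t)) (pvPop t) ≠ m := by omega
      by_cases h2 : rest.foldl (fun a t => min a (pvPop t)) (pvPop t) = pvPop t
      · have h2' : pvPop t = rest.foldl (fun a t => min a (pvPop t)) (pvPop t) := h2.symm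
        rw [if_pos h2, if_neg hMne]
        simp only [decide_eq_true_eq]
        rw [if_pos h2']
        simp
      · have h2' : ¬ pvPop t = rest.foldl (fun a t => min a (pvPop t)) (pvPop t) :=
          fun he => h2 he.symm
        rw [if_neg h2, if_neg hMne]
        simp only [decide_eq_true_eq]
        rw [if_neg h2']
    · by_cases h2 : pvPop t = m
      · have hstep : pvStep (m, vs) t = (m, vs ++ [t.1]) := by simp [pvStep, h2]
        have hmin : min m (pvPop t) = m := by omega
        rw [hstep, ih]
        simp only [hmin]
        by_cases h3 : rest.foldl (fun a t => min a (pvPop t)) m = m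
        · have h2' : pvPop t = rest.foldl (fun a t => min a (pvPop t)) m := by omega
          simp [h3, h2']
        · have h2' : ¬ pvPop t = rest.foldl (fun a t => min a (pvPop t)) m := by
            have := pvMin_mono rest m; omega
          simp [h3, h2']
      · have hstep : pvStep (m, vs) t = (m, vs) := by simp [pvStep, h1, h2]
        have hmin : min m (pvPop t) = m := by omega
        rw [hstep, ih]
        simp only [hmin]
        have h2' : ¬ pvPop t = rest.foldl (fun a t => min a (pvPop t)) m := by
          have := pvMin_mono rest m; omega
        simp [h2']

-- the two ports, re-expressed through pvPop / pvStep (definitional)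
theorem pvPortA_cons (t0 : String × String × String × String)
    (rest : List (String × String × String × String)) :
    population_minimale (t0 :: rest) = rest.foldl pvStep (pvPop t0, [t0.1]) := rfl

theorem pvPortB_cons (t0 : String × String × String × String)
    (rest : List (String × String × String × String)) :
    population_minimale_alt (t0 :: rest)
      = (rest.foldl (fun a t => min a (pvPop t)) (pvPop t0),
         ((t0 :: rest).filter
            (fun t => pvPop t = rest.foldl (fun a t => min a (pvPop t)) (pvPop t0))).map (fun t => t.1)) := by
  unfold population_minimale_alt
  simp only [List.map_cons, PySem.List.min?_id_cons, Option.getD_some, List.foldl_map, pvPop]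
  rfl

-- ===== VERDICT (by name: the statement is the Claim_ definition above) =====
set_option maxRecDepth 4000 in
theorem population_minimale_spec : Claim_equal_population_minimale := by
  intro tab _ hpre
  unfold Spec_population_minimale
  obtain ⟨hne, -⟩ := hpre
  match tab with
  | [] => exact absurd rfl hne
  | t0 :: rest =>
    rw [pvPortA_cons, pvPortB_cons, pvFold_inv, List.filter_cons]
    refine Prod.ext rfl ?_
    by_cases h0 : rest.foldl (fun a t => min a (pvPop t)) (pvPop t0) = pvPop t0
    · have h0' : pvPop t0 = rest.foldl (fun a t => min a (pvPop t)) (pvPop t0) := h0.symm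
      rw [if_pos h0]
      simp only [decide_eq_true_eq]
      rw [if_pos h0']
      simp
    · have h0' : ¬ pvPop t0 = rest.foldl (fun a t => min a (pvPop t)) (pvPop t0) :=
        fun he => h0 he.symm
      rw [if_neg h0]
      simp only [decide_eq_true_eq]
      rw [if_neg h0']
      simp
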